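-- pv_equiv track=rewrite | github.com/bUrn-1337/travel-agent | backend/rag/generator.py | _format_chunks_fallback
-- ===== SOURCE A (Python) =====
-- from typing import Generator
--
-- def _format_chunks_fallback(
--     chunks: list[dict],
--     destination_name: str,
--     days: int,
--     group_type: str,
-- ) -> Generator[str, None, None]:
--     """
--     When no LLM API key is set, format the retrieved chunks directly.
--     Groups chunks by section_type and produces clean markdown.
--     """
--     grouped: dict[str, list[str]] = {}
--     for c in chunks:
--         sec = c.get("section_type", "general")
--         grouped.setdefault(sec, []).append(c["text"])
--
--     SECTION_LABELS = {
--         "itinerary":     "Itinerary",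
--         "highlights":    "Highlights & Attractions",
--         "overview":      "About",
--         "food":          "Food & Cuisine",
--         "transport":     "Getting There & Transport",
--         "accommodation": "Accommodation",
--         "season":        "Best Time to Visit",
--         "suitability":   "Who Should Visit",
--         "budget":        "Budget Guide",
--         "general":       "General Info",
--     }
--
--     header = (
--         f"# Travel Plan: {destination_name}\n"
--         f"*{days}-day trip for {group_type}*\n\n"
--         f"> **Note:** LLM generation is disabled (no API key set). "
--         f"Showing retrieved knowledge base content.\n\n"
--     )
--     yield header
--
--     ordered = ["itinerary", "highlights", "overview", "food",
--                "transport", "accommodation", "season", "budget", "general"]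
--
--     for sec in ordered:
--         if sec not in grouped:
--             continue
--         label = SECTION_LABELS.get(sec, sec.title())
--         yield f"## {label}\n\n"
--         for text in grouped[sec]:
--             yield text + "\n\n"
-- ===== SOURCE B (Python) =====
-- def _format_chunks_fallback(
--     chunks,
--     destination_name,
--     days,
--     group_type,
-- ):
--     # Eagerly flatten to (section, text) pairs, then emit each section by
--     # scanning the pairs per section from a fixed (section, label) table.
--     pairs = [(c.get("section_type", "general"), c["text"]) for c in chunks]
--
--     yield (
--         f"# Travel Plan: {destination_name}\n"
--         f"*{days}-day trip for {group_type}*\n\n"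
--         f"> **Note:** LLM generation is disabled (no API key set). "
--         f"Showing retrieved knowledge base content.\n\n"
--     )
--
--     for sec, label in [
--         ("itinerary",     "Itinerary"),
--         ("highlights",    "Highlights & Attractions"),
--         ("overview",      "About"),
--         ("food",          "Food & Cuisine"),
--         ("transport",     "Getting There & Transport"),
--         ("accommodation", "Accommodation"),
--         ("season",        "Best Time to Visit"),
--         ("budget",        "Budget Guide"),
--         ("general",       "General Info"),
--     ]:
--         texts = [t for s, t in pairs if s == sec]
--         if texts:
--             yield f"## {label}\n\n"
--             for t in texts:
--                 yield t + "\n\n"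
-- ===== Notes on version B (the rewrite author's own statement) =====
-- stated objective: alternative
-- what changed: B drops A's grouped-dict index entirely: it flattens chunks once into (section, text) pairs and then, driven by a single fixed (section, label) table, emits each section by filtering the pairs per section, instead of building a setdefault-append dict and probing it per ordered key with a separate label dict and .title() fallback.
import Mathlib
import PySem

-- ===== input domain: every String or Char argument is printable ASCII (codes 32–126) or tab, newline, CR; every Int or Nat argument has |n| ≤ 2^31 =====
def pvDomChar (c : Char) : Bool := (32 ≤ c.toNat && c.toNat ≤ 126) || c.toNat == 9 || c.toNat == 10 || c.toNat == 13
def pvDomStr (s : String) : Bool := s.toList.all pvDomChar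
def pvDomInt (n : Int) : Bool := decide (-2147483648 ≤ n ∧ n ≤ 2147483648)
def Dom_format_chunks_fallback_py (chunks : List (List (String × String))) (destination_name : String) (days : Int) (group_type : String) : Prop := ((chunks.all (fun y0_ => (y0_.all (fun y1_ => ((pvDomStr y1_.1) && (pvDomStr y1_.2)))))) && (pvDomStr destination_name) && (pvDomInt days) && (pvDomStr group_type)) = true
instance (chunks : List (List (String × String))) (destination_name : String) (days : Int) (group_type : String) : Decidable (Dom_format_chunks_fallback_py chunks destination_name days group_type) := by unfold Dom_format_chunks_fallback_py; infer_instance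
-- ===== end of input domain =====

-- B replaces A's grouped-dict index by a flat (section, text) pair list scanned once per
-- section from a single fixed (section, label) table (alternative decomposition, no speed claim).
-- Note: the Python originals are generators; the equivalence is about the list of yielded strings.

-- ===== PORT A =====

-- hand port of str.title(); exact on ASCII letters (the only place it is used is the
-- dead .get fallback below, where sec ranges over the lowercase ASCII literals of fcOrdered)
def pyTitle (s : String) : String :=
  (String.ofList ((s.toList).foldl (fun (acc : List Char × Bool) ch =>
      if ch.isAlpha then
        (acc.1 ++ [if acc.2 then ch.toLower else ch.toUpper], true)
      else (acc.1 ++ [ch], false)) ([], false)).1)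

def fcLabels : PySem.Dict String String := PySem.Dict.ofList
  [("itinerary", "Itinerary"), ("highlights", "Highlights & Attractions"),
   ("overview", "About"), ("food", "Food & Cuisine"),
   ("transport", "Getting There & Transport"), ("accommodation", "Accommodation"),
   ("season", "Best Time to Visit"), ("suitability", "Who Should Visit"),
   ("budget", "Budget Guide"), ("general", "General Info")]

def fcOrdered : List String :=
  ["itinerary", "highlights", "overview", "food", "transport",
   "accommodation", "season", "budget", "general"]

def fcHeader (destination_name : String) (days : Int) (group_type : String) : String :=
  "# Travel Plan: " ++ destination_name ++ "\n*" ++ PySem.Int.toStr days ++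
  "-day trip for " ++ group_type ++
  "*\n\n> **Note:** LLM generation is disabled (no API key set). Showing retrieved knowledge base content.\n\n"

def format_chunks_fallback_py (chunks : List (List (String × String))) (destination_name : String) (days : Int) (group_type : String) : List String :=
  -- grouped.setdefault(sec, []).append(c["text"]) = modify sec [] (· ++ [text]);
  -- c["text"] raises KeyError when absent: Pre_ excludes that, so getD "" is never the default there
  let grouped : PySem.Dict String (List String) :=
    chunks.foldl (fun g c =>
      let sec := (PySem.Dict.get? (PySem.Dict.mk c) "section_type").getD "general"
      g.modify sec [] (· ++ [(PySem.Dict.get? (PySem.Dict.mk c) "text").getD ""])) PySem.Dict.empty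
  let header := fcHeader destination_name days group_type
  fcOrdered.foldl (fun acc sec =>
    if grouped.contains sec = false then acc
    else
      let label := (fcLabels.get? sec).getD (pyTitle sec)
      -- grouped[sec]: the contains guard above makes the [] default unreachable
      acc ++ ("## " ++ label ++ "\n\n") :: (grouped.getD sec []).map (· ++ "\n\n"))
    [header]

-- ===== PORT B =====
def fcSections : List (String × String) :=
  [("itinerary", "Itinerary"), ("highlights", "Highlights & Attractions"),
   ("overview", "About"), ("food", "Food & Cuisine"),
   ("transport", "Getting There & Transport"), ("accommodation", "Accommodation"),
   ("season", "Best Time to Visit"), ("budget", "Budget Guide"),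
   ("general", "General Info")]

def format_chunks_fallback_py_alt (chunks : List (List (String × String))) (destination_name : String) (days : Int) (group_type : String) : List String :=
  -- c["text"] raises KeyError when absent (same as A): Pre_ excludes it, getD "" unreachable there
  let pairs : List (String × String) :=
    chunks.map (fun c =>
      ((PySem.Dict.get? (PySem.Dict.mk c) "section_type").getD "general",
       (PySem.Dict.get? (PySem.Dict.mk c) "text").getD ""))
  fcHeader destination_name days group_type ::
    fcSections.flatMap (fun sl =>
      let texts := (pairs.filter (fun p => p.1 == sl.1)).map (·.2)
      if texts.isEmpty then []
      else ("## " ++ sl.2 ++ "\n\n") :: texts.map (· ++ "\n\n"))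

-- ===== PRECONDITION & SPEC =====
-- Pre_ excludes exactly the inputs where A (and B alike) raises KeyError: a chunk without a "text" key.
def Pre_format_chunks_fallback_py (chunks : List (List (String × String))) (destination_name : String) (days : Int) (group_type : String) : Prop :=
  ∀ c ∈ chunks, (PySem.Dict.get? (PySem.Dict.mk c) "text").isSome
instance (chunks : List (List (String × String))) (destination_name : String) (days : Int) (group_type : String) : Decidable (Pre_format_chunks_fallback_py chunks destination_name days group_type) := by unfold Pre_format_chunks_fallback_py; infer_instance

def pvWitness_format_chunks_fallback_py : (List (List (String × String))) × String × Int × String :=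
  ([[("section_type", "food"), ("text", "eat")], [("text", "hi")]], "Paris", 3, "family")

def Spec_format_chunks_fallback_py (chunks : List (List (String × String))) (destination_name : String) (days : Int) (group_type : String) (out : List String) : Prop := out = format_chunks_fallback_py_alt chunks destination_name days group_type
instance (chunks : List (List (String × String))) (destination_name : String) (days : Int) (group_type : String) (out : List String) : Decidable (Spec_format_chunks_fallback_py chunks destination_name days group_type out) := by unfold Spec_format_chunks_fallback_py; infer_instance

-- ===== CLAIM =====
def Claim_equal_format_chunks_fallback_py : Prop := ∀ (chunks : List (List (String × String))) (destination_name : String) (days : Int) (group_type : String), Dom_format_chunks_fallback_py chunks destination_name days group_type → Pre_format_chunks_fallback_py chunks destination_name days group_type → Spec_format_chunks_fallback_py chunks destination_name days group_type (format_chunks_fallback_py chunks destination_name days group_type)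

-- ===== LEMMAS AND PROOFS =====

-- the (section, text) pair both ports extract from a chunk
def fcKT (c : List (String × String)) : String × String :=
  ((PySem.Dict.get? (PySem.Dict.mk c) "section_type").getD "general",
   (PySem.Dict.get? (PySem.Dict.mk c) "text").getD "")

theorem fcGrouped_getD (chunks : List (List (String × String))) (sec : String) :
    (chunks.foldl (fun g c => g.modify (fcKT c).1 [] (· ++ [(fcKT c).2])) PySem.Dict.empty).getD sec []
      = ((chunks.map fcKT).filter (fun p => p.1 == sec)).map (·.2) := by
  have h := PySem.Dict.getD_foldl_modify_append (chunks.map fcKT) (PySem.Dict.empty) sec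
  rw [List.foldl_map] at h
  simpa [PySem.Dict.getD_empty] using h

theorem fcGrouped_contains (chunks : List (List (String × String))) (sec : String) :
    ((chunks.foldl (fun g c => g.modify (fcKT c).1 [] (· ++ [(fcKT c).2])) PySem.Dict.empty).contains sec = false)
      ↔ (((chunks.map fcKT).filter (fun p => p.1 == sec)).map (·.2)).isEmpty = true := by
  have hk := PySem.Dict.keys_foldl_modify_key chunks (fun c => (fcKT c).1) []
      (fun _ c => (· ++ [(fcKT c).2])) PySem.Dict.empty
  constructor
  · intro h
    rw [List.isEmpty_iff, List.map_eq_nil_iff, List.filter_eq_nil_iff]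
    intro p hp hpsec
    have hmem : sec ∈ (chunks.foldl (fun g c => g.modify (fcKT c).1 [] (· ++ [(fcKT c).2])) PySem.Dict.empty).keys := by
      rw [hk, PySem.Set.mem_update]
      right
      rcases List.mem_map.mp hp with ⟨c, hc, rfl⟩
      exact List.mem_map.mpr ⟨c, hc, by simpa using hpsec⟩
    rw [← PySem.Dict.contains_iff_mem_keys] at hmem
    simp [h] at hmem
  · intro h
    rw [List.isEmpty_iff, List.map_eq_nil_iff, List.filter_eq_nil_iff] at h
    by_contra hfalse
    have : sec ∈ (chunks.foldl (fun g c => g.modify (fcKT c).1 [] (· ++ [(fcKT c).2])) PySem.Dict.empty).keys :=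
      (PySem.Dict.contains_iff_mem_keys _ _).mp (by
        cases hcv : (chunks.foldl (fun g c => g.modify (fcKT c).1 [] (· ++ [(fcKT c).2])) PySem.Dict.empty).contains sec
        · exact absurd hcv hfalse
        · rfl)
    rw [hk, PySem.Set.mem_update] at this
    rcases this with h0 | hmem
    · simp [PySem.Dict.keys_empty] at h0
    · rcases List.mem_map.mp hmem with ⟨c, hc, rfl⟩
      exact h (fcKT c) (List.mem_map.mpr ⟨c, hc, rfl⟩) (by simp)

-- ===== VERDICT (by name: the statement is the Claim_ definition above) =====
theorem format_chunks_fallback_py_spec : Claim_equal_format_chunks_fallback_py := by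
  intro chunks destination_name days group_type _ _
  unfold Spec_format_chunks_fallback_py format_chunks_fallback_py format_chunks_fallback_py_alt
  have hstep : (fun (acc : List String) sec =>
      if (chunks.foldl (fun g c => g.modify (fcKT c).1 [] (· ++ [(fcKT c).2])) PySem.Dict.empty).contains sec = false then acc
      else acc ++ ("## " ++ ((fcLabels.get? sec).getD (pyTitle sec)) ++ "\n\n")
            :: ((chunks.foldl (fun g c => g.modify (fcKT c).1 [] (· ++ [(fcKT c).2])) PySem.Dict.empty).getD sec []).map (· ++ "\n\n"))
    = (fun acc sec => acc ++
        (if (chunks.foldl (fun g c => g.modify (fcKT c).1 [] (· ++ [(fcKT c).2])) PySem.Dict.empty).contains sec = false then []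
         else ("## " ++ ((fcLabels.get? sec).getD (pyTitle sec)) ++ "\n\n")
            :: ((chunks.foldl (fun g c => g.modify (fcKT c).1 [] (· ++ [(fcKT c).2])) PySem.Dict.empty).getD sec []).map (· ++ "\n\n"))) := by
    funext acc sec
    split <;> simp
  show List.foldl _ _ fcOrdered = _
  rw [show (fun (g : PySem.Dict String (List String)) (c : List (String × String)) =>
        g.modify ((PySem.Dict.get? (PySem.Dict.mk c) "section_type").getD "general") []
          (· ++ [(PySem.Dict.get? (PySem.Dict.mk c) "text").getD ""]))
      = (fun g c => g.modify (fcKT c).1 [] (· ++ [(fcKT c).2])) from rfl]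
  rw [hstep, PySem.List.foldl_append_eq_flatMap]
  show [fcHeader destination_name days group_type] ++ _ = fcHeader destination_name days group_type :: _
  rw [List.singleton_append, List.cons.injEq]
  refine ⟨rfl, ?_⟩
  rw [show fcOrdered = fcSections.map (·.1) from rfl]
  rw [List.flatMap_map]
  apply List.flatMap_congr
  intro sl hsl
  have hc := fcGrouped_contains chunks sl.1
  have hd := fcGrouped_getD chunks sl.1
  have hl : (fcLabels.get? sl.1).getD (pyTitle sl.1) = sl.2 := by
    fin_cases hsl <;> decide
  have hfk : fcKT = (fun c => ((PySem.Dict.get? (PySem.Dict.mk c) "section_type").getD "general", (PySem.Dict.get? (PySem.Dict.mk c) "text").getD "")) := rfl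
  simp only [hfk] at hc hd
  simp only [hfk, hd, hl]
  by_cases h : (chunks.foldl (fun g c => g.modify ((PySem.Dict.get? (PySem.Dict.mk c) "section_type").getD "general") [] (· ++ [(PySem.Dict.get? (PySem.Dict.mk c) "text").getD ""])) PySem.Dict.empty).contains sl.1 = false
  · rw [if_pos h, if_pos (hc.mp h)]
  · have hne : (((chunks.map (fun c => ((PySem.Dict.get? (PySem.Dict.mk c) "section_type").getD "general", (PySem.Dict.get? (PySem.Dict.mk c) "text").getD ""))).filter (fun p => p.1 == sl.1)).map (·.2)).isEmpty = false := by
      cases hic : (((chunks.map (fun c => ((PySem.Dict.get? (PySem.Dict.mk c) "section_type").getD "general", (PySem.Dict.get? (PySem.Dict.mk c) "text").getD ""))).filter (fun p => p.1 == sl.1)).map (·.2)).isEmpty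
      · rfl
      · exact absurd (hc.mpr hic) h
    rw [if_neg h, if_neg (by simp [hne])]
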